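-- pv_equiv track=rewrite | github.com/TauOmicronMu/proofchecker | parser.py | depths
-- ===== SOURCE A (Python) =====
-- def depths(exp):
--     ret = []
--     ctr = 0
--     for c in exp:
--         if c == '(':
--             ctr += 1
--         elif c == ')':
--             ctr -= 1
--         ret.append(ctr)
--     return ret
-- ===== SOURCE B (Python) =====
-- def depths(exp):
--     if len(exp) <= 1:
--         if not exp:
--             return []
--         c = exp[0]
--         return [1 if c == '(' else -1 if c == ')' else 0]
--     mid = len(exp) // 2
--     left = depths(exp[:mid])
--     off = left[-1]
--     return left + [off + d for d in depths(exp[mid:])]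
-- ===== Notes on version B (the rewrite author's own statement) =====
-- stated objective: alternative
-- what changed: Replaced A's single left-to-right accumulator scan with a divide-and-conquer recursion: split the string in half, compute each half's depths recursively, and offset the right half's depths by the left half's final depth.
import Mathlib
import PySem

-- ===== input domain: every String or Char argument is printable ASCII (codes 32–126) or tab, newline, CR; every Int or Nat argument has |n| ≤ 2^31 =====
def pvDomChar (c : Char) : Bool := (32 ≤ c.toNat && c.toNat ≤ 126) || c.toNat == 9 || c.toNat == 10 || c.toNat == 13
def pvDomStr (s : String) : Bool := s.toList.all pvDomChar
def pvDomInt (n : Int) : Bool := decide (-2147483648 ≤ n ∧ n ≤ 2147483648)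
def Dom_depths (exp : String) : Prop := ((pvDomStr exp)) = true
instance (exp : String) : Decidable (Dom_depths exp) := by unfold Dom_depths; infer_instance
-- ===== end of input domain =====

-- B replaces A's single accumulator scan with a divide-and-conquer recursion (alternative algorithm).

-- ===== PORT A =====
-- A's single loop maintaining (ret, ctr) and appending ctr after each character.
def depths (exp : String) : List Int :=
  (exp.toList.foldl
    (fun (st : List Int × Int) c =>
      let ctr := if c = '(' then st.2 + 1 else if c = ')' then st.2 - 1 else st.2
      (st.1 ++ [ctr], ctr))
    ([], 0)).1

-- ===== PORT B =====
-- Source B's divide-and-conquer on the character list: base cases for length ≤ 1,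
-- otherwise split at mid = len // 2, recurse on both halves (exp[:mid] / exp[mid:] = take/drop,
-- exact for 0 ≤ mid ≤ len), and offset the right half by left[-1] (left is nonempty since mid ≥ 1,
-- so getLastD 0 is exact for Python's left[-1]).  The fuel argument (started at the
-- list length, which bounds the shrinking sublist lengths) is only a structural totality
-- guard; the 0-fuel arm is unreachable from depths_alt.
def depthsDCAux : Nat → List Char → List Int
  | _, [] => []
  | _, [c] => [if c = '(' then 1 else if c = ')' then -1 else 0]
  | 0, _ :: _ :: _ => []
  | fuel+1, a :: b :: rest =>
    let l := a :: b :: rest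
    let mid := l.length / 2
    let left := depthsDCAux fuel (l.take mid)
    let off := left.getLastD 0
    left ++ (depthsDCAux fuel (l.drop mid)).map (fun d => off + d)

def depths_alt (exp : String) : List Int := depthsDCAux exp.toList.length exp.toList

-- ===== PRECONDITION & SPEC =====
def Spec_depths (exp : String) (out : List Int) : Prop := out = depths_alt exp
instance (exp : String) (out : List Int) : Decidable (Spec_depths exp out) := by unfold Spec_depths; infer_instance

-- ===== CLAIM (what is proved, stated in full; the proofs are below) =====
def Claim_equal_depths : Prop := ∀ (exp : String), Dom_depths exp → Spec_depths exp (depths exp)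

-- ===== LEMMAS AND PROOFS =====
-- proof-only characterisation: running prefix sums of the ±1/0 deltas
def pvDelta (c : Char) : Int := if c = '(' then 1 else if c = ')' then -1 else 0

def pvPref (a : Int) : List Char → List Int
  | [] => []
  | c :: cs => (a + pvDelta c) :: pvPref (a + pvDelta c) cs

theorem depths_loop (l : List Char) : ∀ (ret : List Int) (ctr : Int),
    (l.foldl
      (fun (st : List Int × Int) c =>
        let ctr := if c = '(' then st.2 + 1 else if c = ')' then st.2 - 1 else st.2
        (st.1 ++ [ctr], ctr))
      (ret, ctr)).1 = ret ++ pvPref ctr l := by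
  induction l with
  | nil => intro ret ctr; simp [pvPref]
  | cons c cs ih =>
    intro ret ctr
    simp only [List.foldl_cons, pvPref, pvDelta]
    rw [ih]
    by_cases h1 : c = '(' <;> by_cases h2 : c = ')' <;> simp_all [List.append_assoc, sub_eq_add_neg]

theorem pvPref_shift (l : List Char) : ∀ a : Int, pvPref a l = (pvPref 0 l).map (fun d => a + d) := by
  induction l with
  | nil => intro a; simp [pvPref]
  | cons c cs ih =>
    intro a
    simp only [pvPref, List.map_cons, zero_add]
    congr 1
    rw [ih (a + pvDelta c), ih (pvDelta c), List.map_map]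
    congr 1
    funext d
    simp [Function.comp, add_assoc]

theorem pvPref_append (l₁ l₂ : List Char) (a : Int) :
    pvPref a (l₁ ++ l₂) = pvPref a l₁ ++ pvPref (a + (l₁.map pvDelta).sum) l₂ := by
  induction l₁ generalizing a with
  | nil => simp [pvPref]
  | cons c cs ih =>
    simp only [List.cons_append, pvPref, List.map_cons, List.sum_cons, ih, add_assoc]

theorem pvPref_last (l : List Char) (hl : l ≠ []) : ∀ (a d : Int),
    (pvPref a l).getLastD d = a + (l.map pvDelta).sum := by
  induction l with
  | nil => simp at hl
  | cons c cs ih =>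
    intro a d
    cases hcs : cs with
    | nil => subst hcs; simp [pvPref]
    | cons e es =>
      subst hcs
      rw [pvPref, List.getLastD_cons, ih (by simp) (a + pvDelta c) (a + pvDelta c)]
      simp only [List.map_cons, List.sum_cons]
      ring

theorem depthsDCAux_eq : ∀ (fuel : Nat) (l : List Char), l.length ≤ fuel →
    depthsDCAux fuel l = pvPref 0 l := by
  intro fuel
  induction fuel with
  | zero =>
    intro l hl
    cases l with
    | nil => simp [depthsDCAux, pvPref]
    | cons c cs => simp at hl
  | succ n ih =>
    intro l hl
    match l with
    | [] => simp [depthsDCAux, pvPref]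
    | [c] => simp [depthsDCAux, pvPref, pvDelta]
    | a :: b :: rest =>
      rw [depthsDCAux]
      have hlen : (a :: b :: rest).length = rest.length + 2 := by simp
      have h2 : 2 ≤ (a :: b :: rest).length := by simp
      rw [ih _ (by simp only [List.length_take]; omega),
          ih _ (by simp only [List.length_drop]; simp at hl ⊢; omega)]
      have hsplit : (a :: b :: rest) =
          (a :: b :: rest).take ((a :: b :: rest).length / 2) ++
          (a :: b :: rest).drop ((a :: b :: rest).length / 2) := (List.take_append_drop _ _).symm
      conv_rhs => rw [hsplit]
      rw [pvPref_append]
      have hne : (a :: b :: rest).take ((a :: b :: rest).length / 2) ≠ [] := by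
        intro hc
        have hlc := congrArg List.length hc
        simp only [List.length_take, List.length_nil, List.length_cons] at hlc
        omega
      rw [pvPref_last _ hne 0 0, zero_add,
          pvPref_shift ((a :: b :: rest).drop ((a :: b :: rest).length / 2))
            ((List.map pvDelta ((a :: b :: rest).take ((a :: b :: rest).length / 2))).sum)]

-- ===== VERDICT (by name: the statement is the Claim_ definition above) =====
theorem depths_spec : Claim_equal_depths := by
  intro exp _
  unfold Spec_depths depths depths_alt
  rw [depthsDCAux_eq exp.toList.length exp.toList (le_refl _)]
  simpa using depths_loop exp.toList [] 0
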